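-- pv_equiv track=rewrite | github.com/casper01/AdventOfCode2018 | 18/main.py | resourceValue
-- ===== SOURCE A (Python) =====
-- def resourceValue(grid):
--     wood = 0
--     lumb = 0
--     for line in grid:
--         for cell in line:
--             if cell == '|':
--                 wood += 1
--             elif cell == '#':
--                 lumb += 1
--     return wood * lumb
-- ===== SOURCE B (Python) =====
-- from bisect import bisect_left, bisect_right
--
-- def resourceValue(grid):
--     cells = sorted(c for line in grid for c in line)
--
--     def occurrences(x):
--         return bisect_right(cells, x) - bisect_left(cells, x)
--
--     return occurrences('|') * occurrences('#')
-- ===== Notes on version B (the rewrite author's own statement) =====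
-- stated objective: alternative
-- what changed: Instead of one branch-updated counting pass, B sorts the flattened cells and obtains each symbol's multiplicity as the width of its run via two binary searches (bisect_right - bisect_left), then multiplies.
import Mathlib
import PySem

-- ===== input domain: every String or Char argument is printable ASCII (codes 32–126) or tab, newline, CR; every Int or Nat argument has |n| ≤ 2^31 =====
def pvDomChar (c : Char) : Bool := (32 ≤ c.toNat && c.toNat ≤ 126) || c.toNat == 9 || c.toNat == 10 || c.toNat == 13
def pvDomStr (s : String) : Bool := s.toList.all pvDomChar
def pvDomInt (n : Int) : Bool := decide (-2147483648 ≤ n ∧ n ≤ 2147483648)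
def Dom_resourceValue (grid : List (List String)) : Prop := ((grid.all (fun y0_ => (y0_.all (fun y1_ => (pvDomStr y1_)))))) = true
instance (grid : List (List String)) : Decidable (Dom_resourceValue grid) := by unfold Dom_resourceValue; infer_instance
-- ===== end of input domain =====

-- B replaces A's single branch-updated counting pass by sort + binary search: it sorts the
-- flattened cells and reads each symbol's multiplicity off as bisect_right - bisect_left
-- (alternative algorithm; not faster).


-- ===== PORT A =====
def resourceValue (grid : List (List String)) : Int :=
  let (wood, lumb) := grid.foldl (fun (acc : Int × Int) line =>
    line.foldl (fun (acc : Int × Int) cell =>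
      if cell = "|" then (acc.1 + 1, acc.2)
      else if cell = "#" then (acc.1, acc.2 + 1)
      else acc) acc) (0, 0)
  wood * lumb

-- ===== PORT B =====
def resourceValue_alt (grid : List (List String)) : Int :=
  let cells := PySem.List.sorted (grid.flatMap (fun line => line)) (fun c => c) false
  let occurrences := fun (x : String) =>
    (PySem.List.bisectRight cells x : Int) - (PySem.List.bisectLeft cells x : Int)
  occurrences "|" * occurrences "#"

-- ===== PRECONDITION & SPEC =====
def Spec_resourceValue (grid : List (List String)) (out : Int) : Prop := out = resourceValue_alt grid
instance (grid : List (List String)) (out : Int) : Decidable (Spec_resourceValue grid out) := by unfold Spec_resourceValue; infer_instance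

-- ===== CLAIM (what is proved, stated in full; the proofs are below) =====
def Claim_equal_resourceValue : Prop := ∀ (grid : List (List String)), Dom_resourceValue grid → Spec_resourceValue grid (resourceValue grid)

-- ===== LEMMAS AND PROOFS =====

-- A's inner loop adds the per-line counts of "|" and "#".
theorem rv_inner (line : List String) (w l : Int) :
    line.foldl (fun (acc : Int × Int) cell =>
      if cell = "|" then (acc.1 + 1, acc.2)
      else if cell = "#" then (acc.1, acc.2 + 1)
      else acc) (w, l)
    = (w + line.count "|", l + line.count "#") := by
  induction line generalizing w l with
  | nil => simp
  | cons c cs ih =>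
    simp only [List.foldl_cons, List.count_cons]
    by_cases h1 : c = "|"
    · simp [h1, ih]; ring
    · by_cases h2 : c = "#"
      · simp [h2, ih]; ring
      · simp [h1, h2, ih]

-- A's double loop counts "|" and "#" over the flattened grid.
theorem rv_outer (grid : List (List String)) (w l : Int) :
    grid.foldl (fun (acc : Int × Int) line =>
      line.foldl (fun (acc : Int × Int) cell =>
        if cell = "|" then (acc.1 + 1, acc.2)
        else if cell = "#" then (acc.1, acc.2 + 1)
        else acc) acc) (w, l)
    = (w + ((grid.flatMap (fun line => line)).count "|"),
       l + ((grid.flatMap (fun line => line)).count "#")) := by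
  induction grid generalizing w l with
  | cons g gs ih =>
    simp only [List.foldl_cons, List.flatMap_cons, List.count_append, rv_inner, ih]
    rw [Prod.ext_iff]; constructor <;> push_cast <;> ring
  | nil => simp

-- In a ≤-sorted list indices are monotone.
theorem pv_sorted_mono (xs : List String) (hpw : xs.Pairwise (· ≤ ·))
    (j k : Nat) (hk : k < xs.length) (hjk : j ≤ k) : xs[j]'(by omega) ≤ xs[k] := by
  rcases Nat.lt_or_ge j k with h | h
  · exact (List.pairwise_iff_getElem.mp hpw) j k (by omega) hk h
  · have : j = k := by omega
    subst this; exact le_refl _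

-- Invariant of PySem's bisect_left loop on a ≤-sorted String list.
-- (PySem.List.bisectLeft_spec/bisectRight_spec exist only for Int lists; our cells are Strings,
--  so the String instances are proved here.)
theorem pv_bl_loop (xs : List String) (x : String) (hpw : xs.Pairwise (· ≤ ·)) :
    ∀ (fuel lo hi : Nat), lo ≤ hi → hi ≤ xs.length → hi - lo ≤ fuel →
      (∀ j (hj : j < xs.length), j < lo → xs[j] < x) →
      (∀ j (hj : j < xs.length), hi ≤ j → x ≤ xs[j]) →
      PySem.List.bisectLeftLoop xs x fuel lo hi ≤ xs.length ∧
      (∀ j (hj : j < xs.length), j < PySem.List.bisectLeftLoop xs x fuel lo hi → xs[j] < x) ∧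
      (∀ j (hj : j < xs.length), PySem.List.bisectLeftLoop xs x fuel lo hi ≤ j → x ≤ xs[j]) := by
  intro fuel
  induction fuel with
  | zero =>
    intro lo hi h1 h2 h3 hL hR
    have : hi = lo := by omega
    subst this
    have e : PySem.List.bisectLeftLoop xs x 0 hi hi = hi := rfl
    rw [e]
    exact ⟨by omega, hL, hR⟩
  | succ n ih =>
    intro lo hi h1 h2 h3 hL hR
    rw [PySem.List.bisectLeftLoop]
    by_cases hlt : lo < hi
    · simp only [hlt, if_true]
      have hm : (lo + hi) / 2 < xs.length := by omega
      rw [List.getElem?_eq_getElem hm]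
      by_cases hy : xs[(lo+hi)/2] < x
      · simp only [hy, if_true]
        exact ih ((lo+hi)/2 + 1) hi (by omega) h2 (by omega)
          (fun j hj hjlt => lt_of_le_of_lt (pv_sorted_mono xs hpw j ((lo+hi)/2) hm (by omega)) hy)
          hR
      · simp only [hy, if_false]
        have hx : x ≤ xs[(lo+hi)/2] := le_of_not_gt hy
        exact ih lo ((lo+hi)/2) (by omega) (by omega) (by omega) hL
          (fun j hj hge => hx.trans (pv_sorted_mono xs hpw ((lo+hi)/2) j hj hge))
    · simp only [hlt, if_false]
      have : hi = lo := by omega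
      subst this
      exact ⟨by omega, hL, hR⟩

-- Invariant of PySem's bisect_right loop on a ≤-sorted String list.
theorem pv_br_loop (xs : List String) (x : String) (hpw : xs.Pairwise (· ≤ ·)) :
    ∀ (fuel lo hi : Nat), lo ≤ hi → hi ≤ xs.length → hi - lo ≤ fuel →
      (∀ j (hj : j < xs.length), j < lo → xs[j] ≤ x) →
      (∀ j (hj : j < xs.length), hi ≤ j → x < xs[j]) →
      PySem.List.bisectRightLoop xs x fuel lo hi ≤ xs.length ∧
      (∀ j (hj : j < xs.length), j < PySem.List.bisectRightLoop xs x fuel lo hi → xs[j] ≤ x) ∧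
      (∀ j (hj : j < xs.length), PySem.List.bisectRightLoop xs x fuel lo hi ≤ j → x < xs[j]) := by
  intro fuel
  induction fuel with
  | zero =>
    intro lo hi h1 h2 h3 hL hR
    have : hi = lo := by omega
    subst this
    have e : PySem.List.bisectRightLoop xs x 0 hi hi = hi := rfl
    rw [e]
    exact ⟨by omega, hL, hR⟩
  | succ n ih =>
    intro lo hi h1 h2 h3 hL hR
    rw [PySem.List.bisectRightLoop]
    by_cases hlt : lo < hi
    · simp only [hlt, if_true]
      have hm : (lo + hi) / 2 < xs.length := by omega
      rw [List.getElem?_eq_getElem hm]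
      by_cases hy : x < xs[(lo+hi)/2]
      · simp only [hy, if_true]
        exact ih lo ((lo+hi)/2) (by omega) (by omega) (by omega) hL
          (fun j hj hge => hy.trans_le (pv_sorted_mono xs hpw ((lo+hi)/2) j hj hge))
      · simp only [hy, if_false]
        have hx : xs[(lo+hi)/2] ≤ x := le_of_not_gt hy
        exact ih ((lo+hi)/2 + 1) hi (by omega) h2 (by omega)
          (fun j hj hjlt => (pv_sorted_mono xs hpw j ((lo+hi)/2) hm (by omega)).trans hx)
          hR
    · simp only [hlt, if_false]
      have : hi = lo := by omega
      subst this
      exact ⟨by omega, hL, hR⟩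

-- On a ≤-sorted list, bisect_right - bisect_left is the multiplicity of x.
theorem pv_bisect_count (s : List String) (x : String) (hpw : s.Pairwise (· ≤ ·)) :
    (PySem.List.bisectRight s x : Int) - (PySem.List.bisectLeft s x : Int) = s.count x := by
  obtain ⟨hbl1, hbl2, hbl3⟩ := pv_bl_loop s x hpw s.length 0 s.length (by omega) (le_refl _)
    (by omega) (by omega) (by omega)
  obtain ⟨hbr1, hbr2, hbr3⟩ := pv_br_loop s x hpw s.length 0 s.length (by omega) (le_refl _)
    (by omega) (by omega) (by omega)
  set bl := PySem.List.bisectLeftLoop s x s.length 0 s.length with hbldef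
  set br := PySem.List.bisectRightLoop s x s.length 0 s.length with hbrdef
  have hble : bl ≤ br := by
    by_contra h
    have hblt : br < bl := by omega
    have hbrlen : br < s.length := lt_of_lt_of_le hblt hbl1
    exact absurd ((hbl2 br hbrlen hblt).trans' (hbr3 br hbrlen (le_refl _))) (lt_irrefl _)
  have hsplit : s = s.take bl ++ ((s.drop bl).take (br - bl) ++ s.drop br) := by
    have h1 : s.drop br = (s.drop bl).drop (br - bl) := by
      rw [List.drop_drop]; congr 1; omega
    rw [h1, List.take_append_drop, List.take_append_drop]
  have c1 : (s.take bl).count x = 0 := by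
    rw [List.count_eq_zero]
    intro hmem
    obtain ⟨i, hi, hix⟩ := List.mem_iff_getElem.mp hmem
    have hi' : i < bl := by simp at hi; omega
    have hilen : i < s.length := by omega
    rw [List.getElem_take] at hix
    exact absurd (hix ▸ hbl2 i hilen hi') (lt_irrefl _)
  have c3 : (s.drop br).count x = 0 := by
    rw [List.count_eq_zero]
    intro hmem
    obtain ⟨i, hi, hix⟩ := List.mem_iff_getElem.mp hmem
    have hilen : br + i < s.length := by simp at hi; omega
    rw [List.getElem_drop] at hix
    exact absurd (hix ▸ hbr3 (br + i) hilen (by omega)) (lt_irrefl _)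
  have hmidlen : ((s.drop bl).take (br - bl)).length = br - bl := by
    simp; omega
  have c2 : ((s.drop bl).take (br - bl)).count x = br - bl := by
    have hall : ∀ b ∈ (s.drop bl).take (br - bl), x = b := by
      intro b hb
      obtain ⟨i, hi, hib⟩ := List.mem_iff_getElem.mp hb
      rw [hmidlen] at hi
      have hilen : bl + i < s.length := by omega
      rw [List.getElem_take, List.getElem_drop] at hib
      have h1 : x ≤ s[bl + i] := hbl3 (bl + i) hilen (by omega)
      have h2 : s[bl + i] ≤ x := hbr2 (bl + i) hilen (by omega)
      rw [← hib]
      exact le_antisymm h1 h2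
    have := List.count_eq_length.mpr hall
    rw [hmidlen] at this
    exact this
  have : s.count x = br - bl := by
    conv_lhs => rw [hsplit]
    rw [List.count_append, List.count_append, c1, c2, c3]
    omega
  unfold PySem.List.bisectLeft PySem.List.bisectRight
  rw [← hbldef, ← hbrdef, this]
  omega

-- ===== VERDICT (by name: the statement is the Claim_ definition above) =====
theorem resourceValue_spec : Claim_equal_resourceValue := by
  intro grid _
  unfold Spec_resourceValue resourceValue resourceValue_alt
  have hperm := PySem.List.sorted_perm (grid.flatMap (fun line => line)) (fun c => c) false
  have hpw : (PySem.List.sorted (grid.flatMap (fun line => line)) (fun c => c) false).Pairwise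
      (· ≤ ·) := by
    simpa using PySem.List.sorted_pairwise (grid.flatMap (fun line => line)) (fun c => c)
  simp only [rv_outer, zero_add, pv_bisect_count _ _ hpw, hperm.count_eq]
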